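-- pv_equiv track=rewrite | github.com/bingobangobongo929/dnd-campaign-manager | scripts/import-vault-characters.py | fix_common_typos
-- ===== SOURCE A (Python) =====
-- def fix_common_typos(text: str) -> str:
--     """Fix common typos."""
--     if not text:
--         return text
--     typos = {
--         'Rouge': 'Rogue',
--         'rouge': 'rogue',
--         'Palyer': 'Player',
--         'palyer': 'player',
--         'Charcter': 'Character',
--         'charcter': 'character',
--         'recieve': 'receive',
--         'seperate': 'separate',
--         'occured': 'occurred',
--         'definately': 'definitely',
--     }
--     for typo, correction in typos.items():
--         text = text.replace(typo, correction)
--     return text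
-- ===== SOURCE B (Python) =====
-- def fix_common_typos(text: str) -> str:
--     """Fix common typos in a single left-to-right scan of the text."""
--     typos = [
--         ('Rouge', 'Rogue'), ('rouge', 'rogue'),
--         ('Palyer', 'Player'), ('palyer', 'player'),
--         ('Charcter', 'Character'), ('charcter', 'character'),
--         ('recieve', 'receive'), ('seperate', 'separate'),
--         ('occured', 'occurred'), ('definately', 'definitely'),
--     ]
--     out = []
--     i = 0
--     n = len(text)
--     while i < n:
--         for typo, correction in typos:
--             if text.startswith(typo, i):
--                 out.append(correction)
--                 i += len(typo)
--                 break
--         else: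
--             out.append(text[i])
--             i += 1
--     return ''.join(out)
-- ===== Notes on version B (the rewrite author's own statement) =====
-- stated objective: alternative
-- what changed: Instead of ten sequential full-string replace passes (one per typo), B corrects every typo in a single left-to-right scan that matches the typo table at each position and copies or substitutes as it goes.
-- outside the precondition, e.g. on fix_common_typos('Palyerouge'): A returns 'Playerogue', B returns 'Playerouge'; on fix_common_typos('occuredefinately'): A returns 'occurredefinitely', B returns 'occurredefinately'
import Mathlib
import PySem

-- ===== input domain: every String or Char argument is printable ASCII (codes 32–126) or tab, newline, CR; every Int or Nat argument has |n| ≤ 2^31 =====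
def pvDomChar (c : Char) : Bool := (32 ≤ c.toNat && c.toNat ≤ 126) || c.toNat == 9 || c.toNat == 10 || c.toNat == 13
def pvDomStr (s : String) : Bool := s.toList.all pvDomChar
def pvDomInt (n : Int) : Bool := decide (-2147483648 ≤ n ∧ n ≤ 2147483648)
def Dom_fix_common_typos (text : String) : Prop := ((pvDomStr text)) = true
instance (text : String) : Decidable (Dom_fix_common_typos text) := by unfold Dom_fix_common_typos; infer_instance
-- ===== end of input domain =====

-- B replaces A's ten sequential str.replace passes by one left-to-right scan that matches the
-- typo table at each position; same cost class, no speed claim (objective: alternative).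

-- ===== PORT A =====
-- the typos dict of A, in insertion order
def tyS : List (String × String) :=
  [("Rouge", "Rogue"), ("rouge", "rogue"), ("Palyer", "Player"), ("palyer", "player"),
   ("Charcter", "Character"), ("charcter", "character"), ("recieve", "receive"),
   ("seperate", "separate"), ("occured", "occurred"), ("definately", "definitely")]

def fix_common_typos (text : String) : String :=
  if text = "" then text
  else tyS.foldl (fun s p => PySem.Str.replace s p.1 p.2) text

-- ===== PORT B =====
-- the same typo table, as lists of characters (Source B scans the text by character position)
def tyBC : List (List Char × List Char) :=
  [("Rouge".toList, "Rogue".toList), ("rouge".toList, "rogue".toList),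
   ("Palyer".toList, "Player".toList), ("palyer".toList, "player".toList),
   ("Charcter".toList, "Character".toList), ("charcter".toList, "character".toList),
   ("recieve".toList, "receive".toList), ("seperate".toList, "separate".toList),
   ("occured".toList, "occurred".toList), ("definately".toList, "definitely".toList)]

-- the while-loop of Source B: at each position take the first typo that matches (for/else), else copy the char
def scanB : List Char → List Char
  | [] => []
  | ch :: t =>
    match h : tyBC.find? (fun p => p.1.isPrefixOf (ch :: t)) with
    | some p => p.2 ++ scanB ((ch :: t).drop p.1.length)
    | none => ch :: scanB t
termination_by l => l.length
decreasing_by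
  · have hmem := List.mem_of_find?_eq_some h
    have hne : p.1 ≠ [] := by fin_cases hmem <;> simp
    have : 0 < p.1.length := List.length_pos_of_ne_nil hne
    simp only [List.length_drop, List.length_cons]
    omega
  · simp

def fix_common_typos_alt (text : String) : String := String.ofList (scanB text.toList)

-- ===== PRECONDITION & SPEC =====
-- Pre_ excludes texts in which two typo occurrences overlap (e.g. 'Palyerouge'): there A's
-- sequential passes and B's one simultaneous pass both return defensible but different corrections.
def mergedS : List String :=
  ["Palyerouge", "palyerouge", "Charcterouge", "charcterouge", "Palyerecieve",
   "palyerecieve", "Charcterecieve", "charcterecieve", "occuredefinately"]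

def Pre_fix_common_typos (text : String) : Prop :=
  ∀ m ∈ mergedS, PySem.Str.isIn m text = false

instance (text : String) : Decidable (Pre_fix_common_typos text) := by
  unfold Pre_fix_common_typos; infer_instance

def pvWitness_fix_common_typos : String := "The rouge palyer will recieve a seperate Charcter sheet."

def Spec_fix_common_typos (text : String) (out : String) : Prop := out = fix_common_typos_alt text
instance (text : String) (out : String) : Decidable (Spec_fix_common_typos text out) := by
  unfold Spec_fix_common_typos; infer_instance

-- ===== CLAIM (what is proved, stated in full; the proofs are below) =====
def Claim_equal_fix_common_typos : Prop :=
  ∀ (text : String), Dom_fix_common_typos text → Pre_fix_common_typos text →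
    Spec_fix_common_typos text (fix_common_typos text)

-- ===== LEMMAS AND PROOFS =====

-- structural form of Python's str.replace (old ≠ ''): leftmost, non-overlapping
def rep (k c : List Char) : List Char → List Char
  | [] => []
  | ch :: t =>
    if k ≠ [] ∧ k.isPrefixOf (ch :: t) then c ++ rep k c ((ch :: t).drop k.length)
    else ch :: rep k c t
termination_by l => l.length
decreasing_by
  · rename_i hcond
    have : 0 < k.length := List.length_pos_of_ne_nil hcond.1
    simp only [List.length_drop, List.length_cons]
    omega
  · simp

def FoldC (ps : List (List Char × List Char)) (l : List Char) : List Char :=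
  ps.foldl (fun s p => rep p.1 p.2 s) l

def merged9 : List (List Char) := mergedS.map (·.toList)

def Clean (l : List Char) : Prop := ∀ m ∈ merged9, ¬ m <:+: l

-- all suffixes of all typo keys
def SUF : List (List Char) := tyBC.flatMap (fun p => p.1.tails)

-- ---- basic rep lemmas ----
lemma rep_nil (k c : List Char) : rep k c [] = [] := by rw [rep]

lemma rep_neg (k c : List Char) (ch : Char) (t : List Char) (h : ¬ k <+: (ch :: t)) :
    rep k c (ch :: t) = ch :: rep k c t := by
  rw [rep]
  have : ¬ (k ≠ [] ∧ k.isPrefixOf (ch :: t)) := by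
    rintro ⟨h1, h2⟩
    exact h (List.isPrefixOf_iff_prefix.mp h2)
  rw [if_neg this]

lemma rep_head (k c X : List Char) (hne : k ≠ []) : rep k c (k ++ X) = c ++ rep k c X := by
  obtain ⟨a, k', rfl⟩ := List.exists_cons_of_ne_nil hne
  rw [List.cons_append, rep]
  have hpre : (a :: k').isPrefixOf (a :: (k' ++ X)) = true := by
    rw [← List.cons_append]
    exact List.isPrefixOf_iff_prefix.mpr (List.prefix_append _ _)
  have hdrop : ((a :: (k' ++ X)).drop (a :: k').length) = X := by
    simpa using List.drop_left (l₁ := a :: k') (l₂ := X)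
  rw [if_pos ⟨by simp, hpre⟩, hdrop]

lemma go_eq_rep (old new : List Char) (hne : old ≠ []) :
    ∀ (fuel : Nat) (l acc : List Char), l.length ≤ fuel →
      PySem.Chars.replace.go old new fuel l acc = acc.reverse ++ rep old new l := by
  intro fuel
  induction fuel with
  | zero =>
    intro l acc hl
    have : l = [] := List.eq_nil_of_length_eq_zero (by omega)
    subst this
    simp [PySem.Chars.replace.go, rep]
  | succ n ih =>
    intro l acc hl
    cases l with
    | nil => simp [PySem.Chars.replace.go, rep]
    | cons ch t =>
      rw [PySem.Chars.replace.go]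
      by_cases hp : old.isPrefixOf (ch :: t)
      · rw [if_pos hp, rep, if_pos ⟨hne, hp⟩]
        have hlen : 0 < old.length := List.length_pos_of_ne_nil hne
        rw [ih _ _ (by simp; simp at hl; omega)]
        simp
      · rw [if_neg hp, rep, if_neg (by rintro ⟨h1, h2⟩; exact hp h2)]
        rw [ih t _ (by simp at hl ⊢; omega)]
        simp

lemma replace_eq_rep (s old new : List Char) (h : old ≠ []) :
    PySem.Chars.replace s old new = rep old new s := by
  rw [PySem.Chars.replace]
  simp only [List.isEmpty_iff, h, if_false]
  simpa using go_eq_rep old new h s.length s [] le_rfl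

-- ---- prefix utilities ----
lemma pfx_app (w u v : List Char) (h : w <+: u ++ v) :
    w <+: u ∨ (u <+: w ∧ w.drop u.length <+: v) := by
  by_cases hl : w.length ≤ u.length
  · exact Or.inl ((List.isPrefix_append_of_length hl).mp h)
  · right
    have hu : u <+: u ++ v := List.prefix_append _ _
    have huw : u <+: w := List.prefix_of_prefix_length_le hu h (by omega)
    refine ⟨huw, ?_⟩
    obtain ⟨w', rfl⟩ := huw
    rw [List.drop_left]
    exact (List.prefix_append_right_inj u).mp h

lemma find?_split {α : Type} (l : List α) (f : α → Bool) (b : α) (h : l.find? f = some b) :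
    ∃ as bs, l = as ++ b :: bs ∧ f b = true ∧ ∀ a ∈ as, f a = false := by
  induction l with
  | nil => simp at h
  | cons x xs ih =>
    rw [List.find?] at h
    by_cases hx : f x
    · rw [hx] at h; simp at h; subst h
      exact ⟨[], xs, by simp, hx, by simp⟩
    · simp only [Bool.not_eq_true] at hx
      rw [hx] at h; simp at h
      obtain ⟨as, bs, rfl, hb, hall⟩ := ih h
      exact ⟨x :: as, bs, by simp, hb, by
        intro a ha
        rcases List.mem_cons.mp ha with rfl | ha
        · exact hx
        · exact hall a ha⟩

-- ---- decidable finite facts about the concrete table ----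
lemma fact_keys_ne : ∀ p ∈ tyBC, p.1 ≠ [] := by decide

lemma fact_cfact : ∀ w ∈ SUF, ∀ p ∈ tyBC,
    (w.isPrefixOf p.2 = true → w.isPrefixOf p.1 = true) ∧ p.2.isPrefixOf w = false := by decide

lemma fact_nosub_k : ∀ p ∈ tyBC, ∀ p' ∈ tyBC, ∀ q ∈ List.range 11,
    0 < q → q < p.1.length → p'.1.isPrefixOf (p.1.drop q) = false := by decide

lemma fact_cross_k : ∀ p ∈ tyBC, ∀ p' ∈ tyBC, ∀ q ∈ List.range 11,
    0 < q → q < p.1.length → (p.1.drop q).isPrefixOf p'.1 = true →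
      (p.1 ++ p'.1.drop (p.1.length - q)) ∈ merged9 := by decide

lemma fact_nosub_c : ∀ p ∈ tyBC, ∀ p' ∈ tyBC, ∀ q ∈ List.range 11,
    0 < q → q < p.2.length → p'.1.isPrefixOf (p.2.drop q) = false := by decide

lemma fact_cross_c : ∀ p ∈ tyBC, ∀ p' ∈ tyBC, ∀ q ∈ List.range 11,
    0 < q → q < p.2.length → (p.2.drop q).isPrefixOf p'.1 = true →
      (p.1 ++ p'.1.drop (p.2.length - q)) ∈ merged9 := by decide

lemma fact_knotc : ∀ p ∈ tyBC, ∀ p' ∈ tyBC,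
    p'.1.isPrefixOf p.2 = false ∧ p.2.isPrefixOf p'.1 = false := by decide

lemma fact_suf_mem : ∀ p ∈ tyBC, ∀ w : List Char, w <:+ p.1 → w ∈ SUF := by
  intro p hp w hw
  exact List.mem_flatMap.mpr ⟨p, hp, (List.mem_tails _ _).mpr hw⟩

lemma fact_suf_tail : ∀ (a : Char) (w : List Char), (a :: w) ∈ SUF → w ∈ SUF := by
  intro a w h
  obtain ⟨p, hp, hw⟩ := List.mem_flatMap.mp h
  refine List.mem_flatMap.mpr ⟨p, hp, (List.mem_tails _ _).mpr ?_⟩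
  exact (List.suffix_cons a w).trans ((List.mem_tails _ _).mp hw)

-- ---- the head-stability lemma: a key suffix prefixing a replaced string prefixes the original ----
lemma heads_one : ∀ (n : Nat) (r : List Char), r.length ≤ n → ∀ w ∈ SUF, ∀ p ∈ tyBC,
    w <+: rep p.1 p.2 r → w <+: r := by
  intro n
  induction n with
  | zero =>
    intro r hr w hw p hp hpre
    have : r = [] := List.eq_nil_of_length_eq_zero (by omega)
    subst this
    rw [rep_nil] at hpre
    simpa [List.prefix_nil.mp hpre] using List.nil_prefix
  | succ n ih =>
    intro r hr w hw p hp hpre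
    cases r with
    | nil =>
      rw [rep_nil] at hpre
      simpa [List.prefix_nil.mp hpre] using List.nil_prefix
    | cons ch t =>
      have hne : p.1 ≠ [] := fact_keys_ne p hp
      by_cases hk : p.1 <+: (ch :: t)
      · obtain ⟨t', ht'⟩ := hk
        rw [← ht'] at hpre ⊢
        rw [rep_head _ _ _ hne] at hpre
        rcases pfx_app _ _ _ hpre with hc | ⟨hc, _⟩
        · have hkpfx := (fact_cfact w hw p hp).1 (List.isPrefixOf_iff_prefix.mpr hc)
          exact List.prefix_append_of_prefix (List.isPrefixOf_iff_prefix.mp hkpfx)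
        · have := (fact_cfact w hw p hp).2
          rw [List.isPrefixOf_iff_prefix.mpr hc] at this
          cases this
      · rw [rep_neg _ _ _ _ hk] at hpre
        cases w with
        | nil => exact List.nil_prefix
        | cons a w' =>
          obtain ⟨rfl, hw'⟩ := List.cons_prefix_cons.mp hpre
          have hw'S : w' ∈ SUF := fact_suf_tail a w' hw
          have := ih t (by simp at hr; omega) w' hw'S p hp hw'
          exact List.cons_prefix_cons.mpr ⟨rfl, this⟩

lemma heads_fold (ps : List (List Char × List Char)) (hps : ∀ p ∈ ps, p ∈ tyBC) :
    ∀ (r : List Char), ∀ w ∈ SUF, w <+: FoldC ps r → w <+: r := by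
  induction ps with
  | nil => intro r w _ h; exact h
  | cons q ps' ih =>
    intro r w hw h
    have h1 : w <+: rep q.1 q.2 r :=
      ih (fun p hp => hps p (List.mem_cons_of_mem q hp)) (rep q.1 q.2 r) w hw h
    exact heads_one r.length r le_rfl w hw q (hps q List.mem_cons_self) h1

-- ---- loop-shape lemmas for the A-side fold ----
lemma rep_app (k c : List Char) : ∀ (u r : List Char),
    (∀ j : Nat, j < u.length → ¬ k <+: (u.drop j ++ r)) →
    rep k c (u ++ r) = u ++ rep k c r := by
  intro u
  induction u with
  | nil => intro r _; rfl
  | cons ch u' ih =>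
    intro r h
    rw [List.cons_append, rep_neg _ _ _ _ (by simpa using h 0 (by simp))]
    rw [ih r (fun j hj => by simpa using h (j+1) (by simp; omega)), List.cons_append]

def SafeU (u r : List Char) : Prop :=
  ∀ p ∈ tyBC, ∀ j : Nat, 0 < j → j < u.length → ¬ (p.1 <+: (u.drop j ++ r))

lemma fold_cons (ps : List (List Char × List Char)) (hps : ∀ p ∈ ps, p ∈ tyBC) :
    ∀ (ch : Char) (t : List Char), (∀ p ∈ tyBC, ¬ p.1 <+: (ch :: t)) →
    FoldC ps (ch :: t) = ch :: FoldC ps t := by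
  induction ps with
  | nil => intro ch t _; rfl
  | cons q ps' ih =>
    intro ch t h
    have hq : q ∈ tyBC := hps q List.mem_cons_self
    show FoldC ps' (rep q.1 q.2 (ch :: t)) = ch :: FoldC ps' (rep q.1 q.2 t)
    rw [rep_neg _ _ _ _ (h q hq)]
    refine ih (fun p hp => hps p (List.mem_cons_of_mem q hp)) ch (rep q.1 q.2 t) ?_
    intro p hp hpre
    have hne : p.1 ≠ [] := fact_keys_ne p hp
    obtain ⟨a, w', hEq⟩ := List.exists_cons_of_ne_nil hne
    rw [hEq] at hpre
    obtain ⟨rfl, hw'⟩ := List.cons_prefix_cons.mp hpre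
    have hw'S : w' ∈ SUF := fact_suf_mem p hp w' (by rw [hEq]; exact List.suffix_cons a w')
    have := heads_one t.length t le_rfl w' hw'S q hq hw'
    exact h p hp (by rw [hEq]; exact List.cons_prefix_cons.mpr ⟨rfl, this⟩)

lemma fold_skip (ps : List (List Char × List Char)) (hps : ∀ p ∈ ps, p ∈ tyBC) :
    ∀ (u r : List Char), (∀ p ∈ ps, ¬ p.1 <+: u ++ r) → SafeU u r →
    FoldC ps (u ++ r) = u ++ FoldC ps r := by
  induction ps with
  | nil => intro u r _ _; rfl
  | cons q ps' ih =>
    intro u r hnh hsafe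
    have hq : q ∈ tyBC := hps q List.mem_cons_self
    have hps' : ∀ p ∈ ps', p ∈ tyBC := fun p hp => hps p (List.mem_cons_of_mem q hp)
    show FoldC ps' (rep q.1 q.2 (u ++ r)) = u ++ FoldC ps' (rep q.1 q.2 r)
    rw [rep_app q.1 q.2 u r ?hcross]
    case hcross =>
      intro j hj
      rcases Nat.eq_zero_or_pos j with rfl | hj0
      · simpa using hnh q List.mem_cons_self
      · exact hsafe q hq j hj0 hj
    refine ih hps' u (rep q.1 q.2 r) ?_ ?_
    · -- NOHEAD transfers through the pass
      intro p hp hpre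
      have hptyBC : p ∈ tyBC := hps' p hp
      rcases pfx_app _ _ _ hpre with hc | ⟨hc, htl⟩
      · exact hnh p (List.mem_cons_of_mem q hp) (List.prefix_append_of_prefix hc)
      · have htlS : p.1.drop u.length ∈ SUF :=
          fact_suf_mem p hptyBC _ (List.drop_suffix _ _)
        have htl' : p.1.drop u.length <+: r :=
          heads_one r.length r le_rfl _ htlS q hq htl
        have : p.1 <+: u ++ r := by
          rw [← List.prefix_iff_eq_append.mp hc]
          exact (List.prefix_append_right_inj u).mpr htl'
        exact hnh p (List.mem_cons_of_mem q hp) this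
    · -- SafeU transfers through the pass
      intro p hp j hj0 hj hpre
      rcases pfx_app _ _ _ hpre with hc | ⟨hc, htl⟩
      · exact hsafe p hp j hj0 hj (List.prefix_append_of_prefix hc)
      · have htlS : p.1.drop (u.drop j).length ∈ SUF :=
          fact_suf_mem p hp _ (List.drop_suffix _ _)
        have htl' : p.1.drop (u.drop j).length <+: r :=
          heads_one r.length r le_rfl _ htlS q hq htl
        have : p.1 <+: u.drop j ++ r := by
          rw [← List.prefix_iff_eq_append.mp hc]
          exact (List.prefix_append_right_inj _).mpr htl'
        exact hsafe p hp j hj0 hj this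

-- ---- the main chars-level theorem ----
lemma fold_nil : ∀ ps : List (List Char × List Char), FoldC ps [] = [] := by
  intro ps
  induction ps with
  | nil => rfl
  | cons q ps' ih => show FoldC ps' (rep q.1 q.2 []) = []; rw [rep_nil]; exact ih

lemma fact_len : ∀ p ∈ tyBC, p.1.length < 11 ∧ p.2.length < 11 := by decide

lemma mainc : ∀ (n : Nat) (l : List Char), l.length ≤ n → Clean l → FoldC tyBC l = scanB l := by
  intro n
  induction n with
  | zero =>
    intro l hl _
    have : l = [] := List.eq_nil_of_length_eq_zero (by omega)
    subst this
    rw [fold_nil, scanB]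
  | succ n ih =>
    intro l hl hcl
    cases l with
    | nil => rw [fold_nil, scanB]
    | cons ch t =>
      cases hf : tyBC.find? (fun p => p.1.isPrefixOf (ch :: t)) with
      | none =>
        have hnone : ∀ p ∈ tyBC, ¬ p.1 <+: (ch :: t) := by
          intro p hp hpre
          have := List.find?_eq_none.mp hf p hp
          simp [List.isPrefixOf_iff_prefix.mpr hpre] at this
        rw [scanB, hf, fold_cons tyBC (fun p hp => hp) ch t hnone]
        have hclt : Clean t := fun m hm hinf =>
          hcl m hm (hinf.trans (List.suffix_cons ch t).isInfix)
        rw [ih t (by simp at hl; omega) hclt]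
      | some p =>
        have hmem := List.mem_of_find?_eq_some hf
        have hpre : p.1 <+: (ch :: t) := List.isPrefixOf_iff_prefix.mp (by simpa using List.find?_some hf)
        obtain ⟨as, bs, htyEq, _, hearly⟩ := find?_split _ _ _ hf
        obtain ⟨r, hr⟩ := hpre
        have hne : p.1 ≠ [] := fact_keys_ne p hmem
        have hcl' : Clean (p.1 ++ r) := hr ▸ hcl
        have hclr : Clean r := fun m hm hinf =>
          hcl' m hm (hinf.trans (List.suffix_append p.1 r).isInfix)
        have hsub_as : ∀ q ∈ as, q ∈ tyBC := by
          intro q hq; rw [htyEq]; exact List.mem_append_left _ hq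
        have hsub_bs : ∀ q ∈ bs, q ∈ tyBC := by
          intro q hq; rw [htyEq]
          exact List.mem_append_right _ (List.mem_cons_of_mem p hq)
        -- the B side
        rw [scanB, hf]
        show FoldC tyBC (ch :: t) = p.2 ++ scanB ((ch :: t).drop p.1.length)
        have hdrop : (ch :: t).drop p.1.length = r := by rw [← hr]; exact List.drop_left
        rw [hdrop, ← hr]
        -- SafeU p.1 r : no key occurrence starts strictly inside the matched typo
        have hsafe1 : SafeU p.1 r := by
          intro q hq j hj0 hj hpx
          rcases pfx_app _ _ _ hpx with hc | ⟨hc, htl⟩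
          · have := fact_nosub_k p hmem q hq j
              (List.mem_range.mpr (by have := (fact_len p hmem).1; omega)) hj0 hj
            rw [List.isPrefixOf_iff_prefix.mpr hc] at this
            cases this
          · have hcrossm := fact_cross_k p hmem q hq j
              (List.mem_range.mpr (by have := (fact_len p hmem).1; omega)) hj0 hj
              (List.isPrefixOf_iff_prefix.mpr hc)
            rw [List.length_drop] at htl
            have hmpfx : (p.1 ++ q.1.drop (p.1.length - j)) <+: p.1 ++ r :=
              (List.prefix_append_right_inj p.1).mpr htl
            exact hcl' _ hcrossm hmpfx.isInfix
        -- the A-side chain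
        have step1 : FoldC as (p.1 ++ r) = p.1 ++ FoldC as r := by
          refine fold_skip as hsub_as p.1 r ?_ hsafe1
          intro q hq hqpre
          have := hearly q hq
          rw [hr] at hqpre
          simp [List.isPrefixOf_iff_prefix.mpr hqpre] at this
        have hX : FoldC tyBC (p.1 ++ r) = FoldC bs (rep p.1 p.2 (p.1 ++ FoldC as r)) := by
          rw [htyEq]
          show FoldC (as ++ p :: bs) (p.1 ++ r) = _
          rw [FoldC, List.foldl_append, ← FoldC, ← FoldC, ← step1]
          rfl
        rw [hX, rep_head _ _ _ hne]
        -- skip the remaining passes over the correction p.2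
        have hsafe2 : SafeU p.2 (rep p.1 p.2 (FoldC as r)) := by
          intro q hq j hj0 hj hpx
          rcases pfx_app _ _ _ hpx with hc | ⟨hc, htl⟩
          · have := fact_nosub_c p hmem q hq j
              (List.mem_range.mpr (by have := (fact_len p hmem).2; omega)) hj0 hj
            rw [List.isPrefixOf_iff_prefix.mpr hc] at this
            cases this
          · have tailS : q.1.drop (p.2.drop j).length ∈ SUF :=
              fact_suf_mem q hq _ (List.drop_suffix _ _)
            have h1 : q.1.drop (p.2.drop j).length <+: FoldC as r :=
              heads_one (FoldC as r).length _ le_rfl _ tailS p hmem htl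
            have h2 : q.1.drop (p.2.drop j).length <+: r :=
              heads_fold as hsub_as r _ tailS h1
            have hcrossm := fact_cross_c p hmem q hq j
              (List.mem_range.mpr (by have := (fact_len p hmem).2; omega)) hj0 hj
              (List.isPrefixOf_iff_prefix.mpr hc)
            rw [List.length_drop] at h2
            have hmpfx : (p.1 ++ q.1.drop (p.2.length - j)) <+: p.1 ++ r :=
              (List.prefix_append_right_inj p.1).mpr h2
            exact hcl' _ hcrossm hmpfx.isInfix
        have step2 : FoldC bs (p.2 ++ rep p.1 p.2 (FoldC as r)) =
            p.2 ++ FoldC bs (rep p.1 p.2 (FoldC as r)) := by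
          refine fold_skip bs hsub_bs p.2 _ ?_ hsafe2
          intro q hq hqpre
          rcases pfx_app _ _ _ hqpre with hc | ⟨hc, _⟩
          · have := (fact_knotc p hmem q (hsub_bs q hq)).1
            rw [List.isPrefixOf_iff_prefix.mpr hc] at this
            cases this
          · have := (fact_knotc p hmem q (hsub_bs q hq)).2
            rw [List.isPrefixOf_iff_prefix.mpr hc] at this
            cases this
        rw [step2]
        have step3 : FoldC bs (rep p.1 p.2 (FoldC as r)) = FoldC tyBC r := by
          conv_rhs => rw [htyEq, FoldC, List.foldl_append]
          rfl
        rw [step3]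
        have hrlen : r.length ≤ n := by
          have h1 : (p.1 ++ r).length = (ch :: t).length := by rw [hr]
          have h2 : 0 < p.1.length := List.length_pos_of_ne_nil hne
          simp at h1 hl
          omega
        rw [ih r hrlen hclr]

-- ---- bridges ----
lemma foldS_toList : ∀ (ps : List (String × String)) (s : String), (∀ p ∈ ps, p.1 ≠ "") →
    (ps.foldl (fun s p => PySem.Str.replace s p.1 p.2) s).toList =
      FoldC (ps.map (fun p => (p.1.toList, p.2.toList))) s.toList := by
  intro ps
  induction ps with
  | nil => intro s _; rfl
  | cons p ps' ih =>
    intro s hne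
    have hne1 : p.1 ≠ "" := hne p List.mem_cons_self
    have hne1' : p.1.toList ≠ [] := by
      intro h
      exact hne1 (String.toList_inj.mp (by simp [h]))
    show (ps'.foldl _ (PySem.Str.replace s p.1 p.2)).toList = _
    rw [ih (PySem.Str.replace s p.1 p.2) (fun q hq => hne q (List.mem_cons_of_mem p hq))]
    show FoldC _ (PySem.Str.replace s p.1 p.2).toList =
      FoldC _ (rep p.1.toList p.2.toList s.toList)
    rw [PySem.Str.toList_replace, replace_eq_rep _ _ _ hne1']

lemma tyS_map : tyS.map (fun p => (p.1.toList, p.2.toList)) = tyBC := by decide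

lemma pre_clean (text : String) (h : Pre_fix_common_typos text) : Clean text.toList := by
  intro m hm
  obtain ⟨mS, hmS, rfl⟩ := List.mem_map.mp hm
  intro hinf
  have htrue : PySem.Str.isIn mS text = true := (PySem.Str.isIn_iff_infix mS text).mpr hinf
  rw [h mS hmS] at htrue
  cases htrue

-- ===== VERDICT (by name: the statement is the Claim_ definition above) =====
theorem fix_common_typos_spec : Claim_equal_fix_common_typos := by
  intro text _hdom hpre
  unfold Spec_fix_common_typos
  apply String.toList_inj.mp
  unfold fix_common_typos fix_common_typos_alt
  by_cases h0 : text = ""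
  · subst h0
    rw [if_pos rfl]
    have : ("" : String).toList = [] := rfl
    rw [this, scanB]
    simp
  · rw [if_neg h0]
    have h1 := foldS_toList tyS text (by decide)
    rw [tyS_map] at h1
    rw [h1]
    have h2 : (String.ofList (scanB text.toList)).toList = scanB text.toList := by simp
    rw [h2]
    exact mainc text.toList.length _ le_rfl (pre_clean text hpre)
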